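-- pv_equiv track=rewrite | github.com/AndrewSerra/csci-665 | hw_5/question_2/palindrome.py | dist_to_palindrome
-- ===== SOURCE A (Python) =====
-- def dist_to_palindrome(cc, ca, s):
--     n = len(s)
--     dp = [[0] * n for _ in range(n)]
--
--     for l in range(2, n + 1):
--         for i in range(n - l + 1):
--             j = i + l - 1
--             if s[i] == s[j]:
--                 dp[i][j] = dp[i+1][j-1] if j - i > 1 else 0
--             else:
--                 dp[i][j] = min(dp[i+1][j-1] + cc, dp[i+1][j] + ca, dp[i][j-1] + ca)
--
--     return dp[0][-1]
-- ===== SOURCE B (Python) =====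
-- def dist_to_palindrome(cc, ca, s):
--     # Top-down memoized recursion over intervals instead of A's bottom-up
--     # table fill: f(i, j) is the min cost to make s[i..j] a palindrome,
--     # computed on demand and cached in a dict keyed by (i, j).
--     n = len(s)
--     memo = {}
--
--     def f(i, j):
--         if j <= i:
--             return 0
--         r = memo.get((i, j))
--         if r is not None:
--             return r
--         if s[i] == s[j]:
--             r = f(i + 1, j - 1)
--         else:
--             r = min(f(i + 1, j - 1) + cc, f(i + 1, j) + ca, f(i, j - 1) + ca)
--         memo[(i, j)] = r
--         return r
--
--     return f(0, n - 1)
-- ===== Notes on version B (the rewrite author's own statement) =====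
-- stated objective: alternative
-- what changed: B replaces A's bottom-up fill of an n*n table by substring length with demand-driven top-down recursion over intervals memoized in a dict, descending the subproblem tree and computing only reachable intervals; same asymptotic cost.
import Mathlib
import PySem

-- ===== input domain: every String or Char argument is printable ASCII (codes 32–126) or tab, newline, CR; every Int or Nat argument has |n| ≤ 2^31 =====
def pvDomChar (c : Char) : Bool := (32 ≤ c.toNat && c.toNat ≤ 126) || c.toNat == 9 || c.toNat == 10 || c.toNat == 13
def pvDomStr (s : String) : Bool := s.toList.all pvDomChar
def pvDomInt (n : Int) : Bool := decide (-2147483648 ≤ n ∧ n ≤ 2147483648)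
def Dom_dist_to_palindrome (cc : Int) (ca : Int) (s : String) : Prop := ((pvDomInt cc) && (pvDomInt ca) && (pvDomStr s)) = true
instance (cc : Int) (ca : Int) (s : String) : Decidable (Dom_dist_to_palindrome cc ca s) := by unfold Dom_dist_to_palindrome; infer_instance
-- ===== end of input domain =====

-- B replaces A's bottom-up n×n table fill by substring length with top-down memoized recursion
-- over intervals (dict cache); equal return values proved for nonempty s (A raises on "").

-- ===== PORT A =====
-- dp is an n×n table of zeros, modelled as a function Int → Int → Int with pointwise update;
-- dp[0][-1] is ported as dp 0 (n-1), exact for nonempty s (Pre_); on "" Python raises IndexError.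
def dist_to_palindrome (cc : Int) (ca : Int) (s : String) : Int :=
  let cs := s.toList
  let n : Int := cs.length
  let dp :=
    (PySem.List.pyRange 2 (n + 1) 1).foldl (fun dp l =>
      (PySem.List.pyRange 0 (n - l + 1) 1).foldl (fun dp i =>
        fun a b =>
          if a = i ∧ b = i + l - 1 then
            (if PySem.List.pyGetD cs i ' ' = PySem.List.pyGetD cs (i + l - 1) ' ' then
              (if (i + l - 1) - i > 1 then dp (i + 1) ((i + l - 1) - 1) else 0)
            else
              min (min (dp (i + 1) ((i + l - 1) - 1) + cc) (dp (i + 1) (i + l - 1) + ca))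
                  (dp i ((i + l - 1) - 1) + ca))
          else dp a b) dp)
      (fun _ _ => (0 : Int))
  dp 0 (n - 1)

-- ===== PORT B =====
-- the memoized helper f: the memo dict is threaded through the recursion as explicit state.
def pvGo (cs : List Char) (cc ca : Int) (i j : Int)
    (memo : PySem.Dict (Int × Int) Int) : Int × PySem.Dict (Int × Int) Int :=
  if h : j ≤ i then (0, memo)
  else
    match memo.get? (i, j) with
    | some r => (r, memo)
    | none =>
      if PySem.List.pyGetD cs i ' ' = PySem.List.pyGetD cs j ' ' then
        let p := pvGo cs cc ca (i + 1) (j - 1) memo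
        (p.1, p.2.insert (i, j) p.1)
      else
        let p1 := pvGo cs cc ca (i + 1) (j - 1) memo
        let p2 := pvGo cs cc ca (i + 1) j p1.2
        let p3 := pvGo cs cc ca i (j - 1) p2.2
        let r := min (min (p1.1 + cc) (p2.1 + ca)) (p3.1 + ca)
        (r, p3.2.insert (i, j) r)
termination_by (j - i).toNat
decreasing_by all_goals omega

def dist_to_palindrome_alt (cc : Int) (ca : Int) (s : String) : Int :=
  let cs := s.toList
  let n : Int := cs.length
  (pvGo cs cc ca 0 (n - 1) PySem.Dict.empty).1

-- ===== PRECONDITION & SPEC =====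
-- Pre_ excludes only the empty string, on which A raises IndexError (dp[0][-1] on an empty dp).
def Pre_dist_to_palindrome (cc : Int) (ca : Int) (s : String) : Prop := s ≠ ""
instance (cc : Int) (ca : Int) (s : String) : Decidable (Pre_dist_to_palindrome cc ca s) := by
  unfold Pre_dist_to_palindrome; infer_instance
def pvWitness_dist_to_palindrome : Int × Int × String := (1, 1, "ab")

def Spec_dist_to_palindrome (cc : Int) (ca : Int) (s : String) (out : Int) : Prop := out = dist_to_palindrome_alt cc ca s
instance (cc : Int) (ca : Int) (s : String) (out : Int) : Decidable (Spec_dist_to_palindrome cc ca s out) := by unfold Spec_dist_to_palindrome; infer_instance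

-- ===== CLAIM (what is proved, stated in full; the proofs are below) =====
def Claim_equal_dist_to_palindrome : Prop := ∀ (cc : Int) (ca : Int) (s : String), Dom_dist_to_palindrome cc ca s → Pre_dist_to_palindrome cc ca s → Spec_dist_to_palindrome cc ca s (dist_to_palindrome cc ca s)

-- ===== LEMMAS AND PROOFS =====

-- Reference recurrence: cost to make s[i..j] a palindrome.
def pvF (cs : List Char) (cc ca : Int) (i j : Int) : Int :=
  if _h : j ≤ i then 0
  else if PySem.List.pyGetD cs i ' ' = PySem.List.pyGetD cs j ' ' then
    pvF cs cc ca (i + 1) (j - 1)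
  else
    min (min (pvF cs cc ca (i + 1) (j - 1) + cc) (pvF cs cc ca (i + 1) j + ca))
        (pvF cs cc ca i (j - 1) + ca)
termination_by (j - i).toNat
decreasing_by all_goals omega

lemma pvF_of_le (cs : List Char) (cc ca : Int) {i j : Int} (h : j ≤ i) :
    pvF cs cc ca i j = 0 := by
  rw [pvF]; simp [h]

lemma pvF_of_lt (cs : List Char) (cc ca : Int) {i j : Int} (h : i < j) :
    pvF cs cc ca i j =
      if PySem.List.pyGetD cs i ' ' = PySem.List.pyGetD cs j ' ' then
        pvF cs cc ca (i + 1) (j - 1)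
      else
        min (min (pvF cs cc ca (i + 1) (j - 1) + cc) (pvF cs cc ca (i + 1) j + ca))
            (pvF cs cc ca i (j - 1) + ca) := by
  rw [pvF]; simp [show ¬ j ≤ i by omega]

-- memo invariant: every cached value is the recurrence's value.
def pvInv (cs : List Char) (cc ca : Int) (m : PySem.Dict (Int × Int) Int) : Prop :=
  ∀ i j r, m.get? (i, j) = some r → r = pvF cs cc ca i j

lemma pvInv_empty (cs : List Char) (cc ca : Int) :
    pvInv cs cc ca PySem.Dict.empty := by
  intro i j r h
  simp [PySem.Dict.get?_empty] at h

lemma pvInv_insert (cs : List Char) (cc ca : Int) (m : PySem.Dict (Int × Int) Int)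
    (hm : pvInv cs cc ca m) (i j : Int) (r : Int) (hr : r = pvF cs cc ca i j) :
    pvInv cs cc ca (m.insert (i, j) r) := by
  intro a b v h
  rw [PySem.Dict.get?_insert] at h
  by_cases hab : (a, b) = (i, j)
  · rw [if_pos hab] at h
    cases h
    cases Prod.mk.injEq .. ▸ hab with
    | intro h1 h2 => subst h1; subst h2; exact hr
  · rw [if_neg hab] at h
    exact hm a b v h

-- the memoized recursion computes pvF and preserves the invariant.
lemma pvGo_correct (cs : List Char) (cc ca : Int) :
    ∀ (k : Nat) (i j : Int) (m : PySem.Dict (Int × Int) Int), (j - i).toNat ≤ k →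
      pvInv cs cc ca m →
      (pvGo cs cc ca i j m).1 = pvF cs cc ca i j ∧ pvInv cs cc ca (pvGo cs cc ca i j m).2 := by
  intro k
  induction k with
  | zero =>
    intro i j m hk hm
    have hji : j ≤ i := by omega
    rw [pvGo]
    simp only [dif_pos hji]
    exact ⟨(pvF_of_le cs cc ca hji).symm, hm⟩
  | succ k ih =>
    intro i j m hk hm
    rw [pvGo]
    by_cases hji : j ≤ i
    · simp only [dif_pos hji]
      exact ⟨(pvF_of_le cs cc ca hji).symm, hm⟩
    · simp only [dif_neg hji]
      have hij : i < j := by omega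
      cases hget : m.get? (i, j) with
      | some r =>
        simp only [hget]
        exact ⟨hm i j r hget, hm⟩
      | none =>
        simp only [hget]
        by_cases hc : PySem.List.pyGetD cs i ' ' = PySem.List.pyGetD cs j ' '
        · simp only [if_pos hc]
          obtain ⟨h1, h2⟩ := ih (i + 1) (j - 1) m (by omega) hm
          have hv : (pvGo cs cc ca (i + 1) (j - 1) m).1 = pvF cs cc ca i j := by
            rw [h1, pvF_of_lt cs cc ca hij, if_pos hc]
          exact ⟨hv, pvInv_insert cs cc ca _ h2 i j _ hv⟩
        · simp only [if_neg hc]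
          obtain ⟨h1, h2⟩ := ih (i + 1) (j - 1) m (by omega) hm
          obtain ⟨h3, h4⟩ := ih (i + 1) j _ (by omega) h2
          obtain ⟨h5, h6⟩ := ih i (j - 1) _ (by omega) h4
          have hv : min (min ((pvGo cs cc ca (i + 1) (j - 1) m).1 + cc)
              ((pvGo cs cc ca (i + 1) j (pvGo cs cc ca (i + 1) (j - 1) m).2).1 + ca))
              ((pvGo cs cc ca i (j - 1)
                (pvGo cs cc ca (i + 1) j (pvGo cs cc ca (i + 1) (j - 1) m).2).2).1 + ca)
              = pvF cs cc ca i j := by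
            rw [h1, h3, h5, pvF_of_lt cs cc ca hij, if_neg hc]
          exact ⟨hv, pvInv_insert cs cc ca _ h6 i j _ hv⟩

-- A inner loop: writing all cells of length l (start index ascending) from shorter lengths.
lemma pvA_inner (cs : List Char) (cc ca n l : Int) (hl : 2 ≤ l) :
    ∀ (k : Nat) (i0 : Int) (dp : Int → Int → Int), (n - l + 1 - i0).toNat ≤ k → 0 ≤ i0 →
      (∀ a b, 0 ≤ a → b < n → b - a + 1 ≤ l - 1 → dp a b = pvF cs cc ca a b) →
      (∀ a, 0 ≤ a → a < i0 → dp a (a + l - 1) = pvF cs cc ca a (a + l - 1)) →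
      ∀ a b, 0 ≤ a → b < n → b - a + 1 ≤ l →
      ((PySem.List.pyRange i0 (n - l + 1) 1).foldl (fun dp i =>
        fun a b =>
          if a = i ∧ b = i + l - 1 then
            (if PySem.List.pyGetD cs i ' ' = PySem.List.pyGetD cs (i + l - 1) ' ' then
              (if (i + l - 1) - i > 1 then dp (i + 1) ((i + l - 1) - 1) else 0)
            else
              min (min (dp (i + 1) ((i + l - 1) - 1) + cc) (dp (i + 1) (i + l - 1) + ca))
                  (dp i ((i + l - 1) - 1) + ca))
          else dp a b) dp) a b = pvF cs cc ca a b := by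
  intro k
  induction k with
  | zero =>
    intro i0 dp hk hi0 h1 h2 a b ha hb hab
    rw [PySem.List.pyRange_one_eq_nil (by omega)]
    simp only [List.foldl_nil]
    by_cases hshort : b - a + 1 ≤ l - 1
    · exact h1 a b ha hb hshort
    · have hb2 : b = a + l - 1 := by omega
      rw [hb2]
      exact h2 a ha (by omega)
  | succ k ih =>
    intro i0 dp hk hi0 h1 h2 a b ha hb hab
    by_cases hlt : i0 < n - l + 1
    · rw [PySem.List.pyRange_one_cons hlt]
      simp only [List.foldl_cons]
      refine ih (i0 + 1) _ (by omega) (by omega) ?_ ?_ a b ha hb hab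
      · intro a' b' ha' hb' hab'
        rw [if_neg (by omega)]
        exact h1 a' b' ha' hb' hab'
      · intro a' ha' ha2'
        by_cases haeq : a' = i0
        · subst haeq
          rw [if_pos ⟨rfl, rfl⟩, pvF_of_lt cs cc ca (show a' < a' + l - 1 by omega)]
          by_cases hc : PySem.List.pyGetD cs a' ' ' = PySem.List.pyGetD cs (a' + l - 1) ' '
          · rw [if_pos hc, if_pos hc]
            by_cases h3 : (a' + l - 1) - a' > 1
            · rw [if_pos h3]
              exact h1 (a' + 1) ((a' + l - 1) - 1) (by omega) (by omega) (by omega)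
            · rw [if_neg h3]
              exact (pvF_of_le cs cc ca (by omega)).symm
          · rw [if_neg hc, if_neg hc,
              h1 (a' + 1) ((a' + l - 1) - 1) (by omega) (by omega) (by omega),
              h1 (a' + 1) (a' + l - 1) (by omega) (by omega) (by omega),
              h1 a' ((a' + l - 1) - 1) (by omega) (by omega) (by omega)]
        · rw [if_neg (fun h => haeq h.1)]
          exact h2 a' ha' (by omega)
    · rw [PySem.List.pyRange_one_eq_nil (by omega)]
      simp only [List.foldl_nil]
      by_cases hshort : b - a + 1 ≤ l - 1
      · exact h1 a b ha hb hshort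
      · have hb2 : b = a + l - 1 := by omega
        rw [hb2]
        exact h2 a ha (by omega)

-- A outer loop: processing lengths 2..n fills every in-range cell with pvF.
lemma pvA_outer (cs : List Char) (cc ca n : Int) :
    ∀ (k : Nat) (L : Int) (dp : Int → Int → Int), (n + 1 - L).toNat ≤ k → 2 ≤ L →
      (∀ a b, 0 ≤ a → b < n → b - a + 1 ≤ L - 1 → dp a b = pvF cs cc ca a b) →
      ∀ a b, 0 ≤ a → b < n →
      ((PySem.List.pyRange L (n + 1) 1).foldl (fun dp l =>
        (PySem.List.pyRange 0 (n - l + 1) 1).foldl (fun dp i =>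
          fun a b =>
            if a = i ∧ b = i + l - 1 then
              (if PySem.List.pyGetD cs i ' ' = PySem.List.pyGetD cs (i + l - 1) ' ' then
                (if (i + l - 1) - i > 1 then dp (i + 1) ((i + l - 1) - 1) else 0)
              else
                min (min (dp (i + 1) ((i + l - 1) - 1) + cc) (dp (i + 1) (i + l - 1) + ca))
                    (dp i ((i + l - 1) - 1) + ca))
            else dp a b) dp) dp) a b = pvF cs cc ca a b := by
  intro k
  induction k with
  | zero =>
    intro L dp hk hL h1 a b ha hb
    rw [PySem.List.pyRange_one_eq_nil (by omega)]
    exact h1 a b ha hb (by omega)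
  | succ k ih =>
    intro L dp hk hL h1 a b ha hb
    by_cases hlt : L < n + 1
    · rw [PySem.List.pyRange_one_cons hlt]
      simp only [List.foldl_cons]
      refine ih (L + 1) _ (by omega) (by omega) ?_ a b ha hb
      intro a' b' ha' hb' hab'
      exact pvA_inner cs cc ca n L hL (n - L + 1).toNat 0 dp (by omega) le_rfl
        h1 (fun a _ h => absurd h (by omega)) a' b' ha' hb' (by omega)
    · rw [PySem.List.pyRange_one_eq_nil (by omega)]
      exact h1 a b ha hb (by omega)

-- ===== VERDICT (by name: the statement is the Claim_ definition above) =====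
theorem dist_to_palindrome_spec : Claim_equal_dist_to_palindrome := by
  unfold Claim_equal_dist_to_palindrome
  intro cc ca s _ hpre
  unfold Spec_dist_to_palindrome
  have hne : s.toList ≠ [] := fun h => hpre (String.toList_eq_nil_iff.mp h)
  have hn : 1 ≤ (s.toList.length : Int) := by
    have := List.length_pos_iff.mpr hne
    omega
  have hA : dist_to_palindrome cc ca s =
      pvF s.toList cc ca 0 ((s.toList.length : Int) - 1) := by
    unfold dist_to_palindrome
    exact pvA_outer s.toList cc ca (s.toList.length : Int)
      ((s.toList.length : Int) + 1 - 2).toNat 2 (fun _ _ => 0) le_rfl (by omega)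
      (fun a b _ _ hab => (pvF_of_le s.toList cc ca (by omega)).symm)
      0 ((s.toList.length : Int) - 1) le_rfl (by omega)
  have hB : dist_to_palindrome_alt cc ca s =
      pvF s.toList cc ca 0 ((s.toList.length : Int) - 1) := by
    unfold dist_to_palindrome_alt
    exact (pvGo_correct s.toList cc ca ((s.toList.length : Int) - 1).toNat 0
      ((s.toList.length : Int) - 1) PySem.Dict.empty (by omega)
      (pvInv_empty s.toList cc ca)).1
  rw [hA, hB]
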